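-- pv_equiv track=rewrite | github.com/mtlynch/migrate-mtlynch-to-hugo | app/projects.py | _filter_unneeded_frontmatter
-- ===== SOURCE A (Python) =====
-- def _filter_unneeded_frontmatter(contents):
--     triple_underscores = 0
--     lines = []
--     for line in contents.split('\n'):
--         if line.startswith('---'):
--             triple_underscores += 1
--             lines.append(line)
--             continue
--         if triple_underscores == 1:
--             if line.startswith('title:'):
--                 pass
--             else:
--                 continue
--         lines.append(line)
--     return '\n'.join(lines)
-- ===== SOURCE B (Python) =====
-- def _filter_unneeded_frontmatter(contents):
--     lines = contents.split('\n')
--     i1 = next((i for i, line in enumerate(lines) if line.startswith('---')), None)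
--     if i1 is None:
--         return '\n'.join(lines)
--     rest = lines[i1 + 1:]
--     j = next((i for i, line in enumerate(rest) if line.startswith('---')), None)
--     body, tail = (rest, []) if j is None else (rest[:j], rest[j:])
--     titles = [line for line in body if line.startswith('title:')]
--     return '\n'.join(lines[:i1 + 1] + titles + tail)
-- ===== Notes on version B (the rewrite author's own statement) =====
-- stated objective: alternative
-- what changed: Replaces the running delimiter counter with per-line branching by first locating the two frontmatter boundaries (first and second '---' line) and then assembling the result from slices: prefix, title-filtered block, untouched tail.
import Mathlib
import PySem

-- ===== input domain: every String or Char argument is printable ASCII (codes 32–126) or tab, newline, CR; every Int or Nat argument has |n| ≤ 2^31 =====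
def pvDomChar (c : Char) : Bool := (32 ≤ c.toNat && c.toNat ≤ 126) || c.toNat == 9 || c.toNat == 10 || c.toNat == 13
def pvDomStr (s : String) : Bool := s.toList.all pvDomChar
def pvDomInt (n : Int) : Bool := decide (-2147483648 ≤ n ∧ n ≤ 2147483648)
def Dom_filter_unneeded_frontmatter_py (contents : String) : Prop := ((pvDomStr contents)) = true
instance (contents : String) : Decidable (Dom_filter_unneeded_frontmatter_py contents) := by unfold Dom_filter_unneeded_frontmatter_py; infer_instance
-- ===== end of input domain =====

-- B locates the two frontmatter '---' boundaries first and assembles the result from slices,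
-- instead of A's running delimiter counter with per-line branching; same O(n) cost, return value only.


-- ===== PORT A =====
def filter_unneeded_frontmatter_py (contents : String) : String :=
  let lines := (PySem.Str.split? contents "\n").getD []
  let st := lines.foldl (fun (st : Int × List String) line =>
    if PySem.Str.startswith line "---" then (st.1 + 1, st.2 ++ [line])
    else if st.1 == 1 then
      (if PySem.Str.startswith line "title:" then (st.1, st.2 ++ [line]) else st)
    else (st.1, st.2 ++ [line])) ((0 : Int), ([] : List String))
  PySem.Str.join "\n" st.2

-- ===== PORT B =====
def filter_unneeded_frontmatter_py_alt (contents : String) : String :=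
  let lines := (PySem.Str.split? contents "\n").getD []
  match lines.findIdx? (fun line => PySem.Str.startswith line "---") with
  | none => PySem.Str.join "\n" lines
  | some i1 =>
    let rest := lines.drop (i1 + 1)
    let bt : List String × List String :=
      match rest.findIdx? (fun line => PySem.Str.startswith line "---") with
      | none => (rest, [])
      | some j => (rest.take j, rest.drop j)
    let titles := bt.1.filter (fun line => PySem.Str.startswith line "title:")
    PySem.Str.join "\n" (lines.take (i1 + 1) ++ titles ++ bt.2)

-- ===== PRECONDITION & SPEC =====
def Spec_filter_unneeded_frontmatter_py (contents : String) (out : String) : Prop := out = filter_unneeded_frontmatter_py_alt contents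
instance (contents : String) (out : String) : Decidable (Spec_filter_unneeded_frontmatter_py contents out) := by unfold Spec_filter_unneeded_frontmatter_py; infer_instance

-- ===== CLAIM (what is proved, stated in full; the proofs are below) =====
def Claim_equal_filter_unneeded_frontmatter_py : Prop := ∀ (contents : String), Dom_filter_unneeded_frontmatter_py contents → Spec_filter_unneeded_frontmatter_py contents (filter_unneeded_frontmatter_py contents)

-- ===== LEMMAS AND PROOFS =====

-- the two line tests, kept as named defs so simp does not bridge them mid-proof
def pvP (l : String) : Bool := PySem.Str.startswith l "---"
def pvT (l : String) : Bool := PySem.Str.startswith l "title:"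

-- A's loop body, abbreviated for the proofs
def pvStep (st : Int × List String) (line : String) : Int × List String :=
  if pvP line then (st.1 + 1, st.2 ++ [line])
  else if st.1 == 1 then
    (if pvT line then (st.1, st.2 ++ [line]) else st)
  else (st.1, st.2 ++ [line])

-- what A's loop keeps while the counter is 1 (inside the first frontmatter block)
def pvPhase1 (ls : List String) : List String :=
  match ls with
  | [] => []
  | l :: t => if pvP l then l :: t else if pvT l then l :: pvPhase1 t else pvPhase1 t

-- what A's loop keeps starting from counter 0
def pvPhase0 (ls : List String) : List String :=
  match ls with
  | [] => []
  | l :: t => if pvP l then l :: pvPhase1 t else l :: pvPhase0 t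

theorem pvA2 (ls : List String) (c : Int) (acc : List String) (h : 2 <= c) :
    (ls.foldl pvStep (c, acc)).2 = acc ++ ls := by
  induction ls generalizing c acc with
  | nil => simp
  | cons l t ih =>
    simp only [List.foldl_cons, pvStep]
    have hc1 : (c == 1) = false := by simp; omega
    by_cases hp : pvP l
    · simp [hp, ih (c + 1) _ (by omega)]
    · simp [hp, hc1, ih c _ h]

theorem pvA1 (ls : List String) (acc : List String) :
    (ls.foldl pvStep ((1 : Int), acc)).2 = acc ++ pvPhase1 ls := by
  induction ls generalizing acc with
  | nil => simp [pvPhase1]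
  | cons l t ih =>
    simp only [List.foldl_cons, pvStep, pvPhase1]
    by_cases hp : pvP l
    · simp [hp, pvA2 t 2 _ (by omega)]
    · by_cases ht : pvT l
      · simp [hp, ht, ih]
      · simp [hp, ht, ih]

theorem pvA0 (ls : List String) (acc : List String) :
    (ls.foldl pvStep ((0 : Int), acc)).2 = acc ++ pvPhase0 ls := by
  induction ls generalizing acc with
  | nil => simp [pvPhase0]
  | cons l t ih =>
    simp only [List.foldl_cons, pvStep, pvPhase0]
    by_cases hp : pvP l
    · simp [hp, pvA1]
    · simp [hp, ih]

theorem pvB1 (ls : List String) :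
    pvPhase1 ls =
      match ls.findIdx? pvP with
      | none => ls.filter pvT
      | some j => (ls.take j).filter pvT ++ ls.drop j := by
  induction ls with
  | nil => simp [pvPhase1]
  | cons l t ih =>
    simp only [pvPhase1, List.findIdx?_cons]
    by_cases hp : pvP l
    · simp [hp]
    · simp only [hp, cond_false]
      cases h : t.findIdx? pvP with
      | none =>
        rw [ih]; simp only [h, Option.map_none, List.filter_cons]
        by_cases ht : pvT l <;> simp [ht]
      | some j =>
        rw [ih]; simp only [h, Option.map_some, List.take_succ_cons, List.drop_succ_cons,
          List.filter_cons]
        by_cases ht : pvT l <;> simp [ht]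

theorem pvB0 (ls : List String) :
    pvPhase0 ls =
      match ls.findIdx? pvP with
      | none => ls
      | some i1 => ls.take (i1 + 1) ++ pvPhase1 (ls.drop (i1 + 1)) := by
  induction ls with
  | nil => simp [pvPhase0]
  | cons l t ih =>
    simp only [pvPhase0, List.findIdx?_cons]
    by_cases hp : pvP l
    · simp [hp]
    · simp only [hp, cond_false]
      cases h : t.findIdx? pvP with
      | none => rw [ih]; simp [h]
      | some i1 => rw [ih]; simp [h]

-- ===== VERDICT (by name: the statement is the Claim_ definition above) =====
theorem filter_unneeded_frontmatter_py_spec : Claim_equal_filter_unneeded_frontmatter_py := by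
  intro contents _
  unfold Spec_filter_unneeded_frontmatter_py filter_unneeded_frontmatter_py filter_unneeded_frontmatter_py_alt
  have eP : (fun line => PySem.Str.startswith line "---") = pvP := rfl
  have eT : (fun line => PySem.Str.startswith line "title:") = pvT := rfl
  set ls := (PySem.Str.split? contents "\n").getD [] with hls
  have hfold : (ls.foldl (fun (st : Int × List String) line =>
      if PySem.Str.startswith line "---" then (st.1 + 1, st.2 ++ [line])
      else if st.1 == 1 then
        (if PySem.Str.startswith line "title:" then (st.1, st.2 ++ [line]) else st)
      else (st.1, st.2 ++ [line])) ((0 : Int), ([] : List String))).2 = pvPhase0 ls :=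
    pvA0 ls []
  simp only [hfold, eP, eT]
  rw [pvB0 ls]
  cases h : ls.findIdx? pvP with
  | none => simp
  | some i1 =>
    simp only []
    rw [pvB1 (ls.drop (i1 + 1))]
    cases h2 : (ls.drop (i1 + 1)).findIdx? pvP with
    | none => simp
    | some j => simp
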